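-- pv_equiv track=rewrite | github.com/Abdallah-Elshamy/Space-Cows | space cows.py | trip
-- ===== SOURCE A (Python) =====
-- def best_cow(cows, weight):
--     """
--     input: a dict of cows that needs to be transported, remaining weight
--     returns: the best cow to be transported
--     """
--     best = ''
--     maxi = 0
--     for key in cows:
--         if cows[key] <= weight:
--             if cows[key]> maxi:
--                 maxi = cows[key]
--                 best = key
--     return best
--
-- def trip(cows,limit= 10):
--     """
--     input: a dict of cows that needs to be transported and maximum wait for one trip
--     returns: a list of cows that will be transfared in one trip
--     """
--     weight = 0
--     trip = []
--     while True:
--         best = best_cow(cows, limit - weight)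
--         if len(best) == 0:
--             return trip
--         else:
--             trip.append(best)
--             weight += cows[best]
--             del(cows[best])
--     return trip
-- ===== SOURCE B (Python) =====
-- def trip(cows, limit=10):
--     """
--     input: a dict of cows that needs to be transported and maximum weight for one trip
--     returns: a list of cows that will be transferred in one trip
--     """
--     loaded = []
--     remaining = limit
--     for name, w in sorted(cows.items(), key=lambda kv: kv[1], reverse=True):
--         if 0 < w <= remaining:
--             loaded.append(name)
--             remaining -= w
--     for name in loaded:
--         del cows[name]
--     return loaded
-- ===== Notes on version B (the rewrite author's own statement) =====
-- stated objective: faster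
-- what changed: Replaces A's repeated full-dict argmax scan (one best_cow pass per loaded cow) with one stable descending sort by weight followed by a single pass that loads every cow fitting the remaining capacity.
-- intended difference: On inputs whose dict maps the empty-string name to a weight w with 0 < w <= limit, A stops loading as soon as that cow is the best fit (its name collides with best_cow's '' no-cow sentinel) and returns the truncated list, while B loads it like any other cow and continues; B's value is the intended greedy result. — e.g. on trip([("", 1)], 10): A returns [], B returns [""]
import Mathlib
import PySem

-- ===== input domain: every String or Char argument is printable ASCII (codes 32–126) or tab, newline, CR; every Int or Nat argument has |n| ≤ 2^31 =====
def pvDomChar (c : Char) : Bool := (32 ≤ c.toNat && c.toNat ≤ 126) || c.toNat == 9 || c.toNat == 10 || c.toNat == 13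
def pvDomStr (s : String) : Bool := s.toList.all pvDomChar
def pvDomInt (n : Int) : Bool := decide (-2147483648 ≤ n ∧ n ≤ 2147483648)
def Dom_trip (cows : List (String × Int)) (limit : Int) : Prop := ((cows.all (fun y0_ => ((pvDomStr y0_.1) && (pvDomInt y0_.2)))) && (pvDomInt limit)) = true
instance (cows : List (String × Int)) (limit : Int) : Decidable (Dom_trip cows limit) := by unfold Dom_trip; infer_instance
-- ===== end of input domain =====

-- B replaces A's repeated best_cow rescans with one stable descending sort by weight and a
-- single pass; equivalence is about the RETURN value (both Pythons also delete the loaded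
-- cows from the argument dict; outside D_ they delete the same keys).

-- ===== PORT A =====
-- best_cow: running (best, maxi) over the dict's keys, first strict maximum among fitting weights
def bestCow (d : PySem.Dict String Int) (weight : Int) : String :=
  (List.foldl
      (fun (bm : String × Int) (k : String) =>
        if d.getD k 0 ≤ weight then
          (if d.getD k 0 > bm.2 then (k, d.getD k 0) else bm)
        else bm)
      ("", 0) d.keys).1

-- the 'while True' loop; each pass through the else-branch erases one key, so
-- d.size + 1 fuel always reaches the 'len(best) == 0' exit
def tripGo (d : PySem.Dict String Int) (limit weight : Int) (acc : List String) : Nat → List String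
  | 0 => acc
  | fuel + 1 =>
    let best := bestCow d (limit - weight)
    if PySem.Str.len best == 0 then acc
    else tripGo (d.erase best) limit (weight + d.getD best 0) (acc ++ [best]) fuel

def trip (cows : List (String × Int)) (limit : Int) : List String :=
  tripGo (PySem.Dict.ofList cows) limit 0 [] ((PySem.Dict.ofList cows).size + 1)

-- ===== PORT B =====
def trip_alt (cows : List (String × Int)) (limit : Int) : List String :=
  (List.foldl
      (fun (st : List String × Int) (kv : String × Int) =>
        if 0 < kv.2 ∧ kv.2 ≤ st.2 then (st.1 ++ [kv.1], st.2 - kv.2) else st)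
      ([], limit)
      (PySem.List.sorted (PySem.Dict.ofList cows).items (fun kv => kv.2) true)).1

-- ===== PRECONDITION & SPEC =====
-- On inputs whose dict maps the empty-string name to a weight w with 0 < w ≤ limit, A stops
-- loading as soon as that cow is the best fit (its name collides with best_cow's '' no-cow
-- sentinel) and returns the truncated list, while B loads it like any other cow and
-- continues; B's value is the intended greedy result.
def D_trip (cows : List (String × Int)) (limit : Int) : Prop :=
  0 < (PySem.Dict.ofList cows).getD "" 0 ∧ (PySem.Dict.ofList cows).getD "" 0 ≤ limit
instance (cows : List (String × Int)) (limit : Int) : Decidable (D_trip cows limit) := by unfold D_trip; infer_instance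

def Spec_trip (cows : List (String × Int)) (limit : Int) (out : List String) : Prop := ¬ D_trip cows limit → out = trip_alt cows limit
instance (cows : List (String × Int)) (limit : Int) (out : List String) : Decidable (Spec_trip cows limit out) := by unfold Spec_trip; infer_instance

def pvDiffWitness_trip : (List (String × Int)) × Int := ([("", 1)], 10)
def pvDiffWitnessOut_trip : (List String) × (List String) := ([], [""])

-- ===== CLAIM (what is proved, stated in full; the proofs are below) =====
def Claim_unchanged_trip : Prop := ∀ (cows : List (String × Int)) (limit : Int), Dom_trip cows limit → Spec_trip cows limit (trip cows limit)
def Claim_changed_trip : Prop := Dom_trip (pvDiffWitness_trip.1) (pvDiffWitness_trip.2) ∧ D_trip (pvDiffWitness_trip.1) (pvDiffWitness_trip.2) ∧ trip (pvDiffWitness_trip.1) (pvDiffWitness_trip.2) = pvDiffWitnessOut_trip.1 ∧ trip_alt (pvDiffWitness_trip.1) (pvDiffWitness_trip.2) = pvDiffWitnessOut_trip.2 ∧ pvDiffWitnessOut_trip.1 ≠ pvDiffWitnessOut_trip.2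

-- ===== LEMMAS AND PROOFS =====

-- the single pass of B, as structural recursion on the sorted list
def pvG : List (String × Int) → Int → List String
  | [], _ => []
  | kv :: t, rem => if 0 < kv.2 ∧ kv.2 ≤ rem then kv.1 :: pvG t (rem - kv.2) else pvG t rem

-- 'this cow fits the remaining capacity'
def pvFit (rem : Int) (kv : String × Int) : Bool := decide (0 < kv.2 ∧ kv.2 ≤ rem)

-- A's best_cow fold, over an items list instead of keys-plus-lookups
def pvPick (xs : List (String × Int)) (rem : Int) : String × Int :=
  xs.foldl
    (fun (bm : String × Int) (kv : String × Int) =>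
      if kv.2 ≤ rem then (if kv.2 > bm.2 then (kv.1, kv.2) else bm) else bm)
    ("", 0)

-- the comparator PySem.List.sorted key=(·.2) reverse=true inserts with
def pvBf (a b : String × Int) : Bool := decide (b.2 < a.2)

def pvSortedDesc (xs : List (String × Int)) : List (String × Int) :=
  PySem.List.sorted xs (fun kv => kv.2) true

lemma pvSortedDesc_append_singleton (xs : List (String × Int)) (x : String × Int) :
    pvSortedDesc (xs ++ [x]) = PySem.List.insertBy pvBf x (pvSortedDesc xs) := by
  unfold pvSortedDesc pvBf
  rw [PySem.List.sorted_rev_eq_foldl_insertBy, PySem.List.sorted_rev_eq_foldl_insertBy,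
    List.foldl_append]
  rfl

lemma pvSortedDesc_pairwise (xs : List (String × Int)) :
    (pvSortedDesc xs).Pairwise (fun a b => b.2 ≤ a.2) :=
  PySem.List.sorted_pairwise_rev xs (fun kv => kv.2)

lemma pvFoldB (l : List (String × Int)) (acc : List String) (rem : Int) :
    (List.foldl
      (fun (st : List String × Int) (kv : String × Int) =>
        if 0 < kv.2 ∧ kv.2 ≤ st.2 then (st.1 ++ [kv.1], st.2 - kv.2) else st)
      (acc, rem) l).1 = acc ++ pvG l rem := by
  induction l generalizing acc rem with
  | nil => simp [pvG]
  | cons kv t ih =>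
    simp only [List.foldl_cons, pvG]
    by_cases h : 0 < kv.2 ∧ kv.2 ≤ rem
    · rw [if_pos h, if_pos h, ih]; simp
    · rw [if_neg h, if_neg h, ih]

lemma pvG_skip (as t : List (String × Int)) (rem : Int)
    (h : ∀ a ∈ as, pvFit rem a = false) : pvG (as ++ t) rem = pvG t rem := by
  induction as with
  | nil => rfl
  | cons a as ih =>
    have ha := h a (by simp)
    simp only [List.cons_append, pvG]
    rw [if_neg (by simpa [pvFit] using ha)]
    exact ih (fun a ha' => h a (by simp [ha']))

lemma pvFit_mono (rem rem' : Int) (a : String × Int) (hle : rem' ≤ rem)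
    (h : pvFit rem a = false) : pvFit rem' a = false := by
  simp only [pvFit, decide_eq_false_iff_not] at *
  omega

lemma pvInsertBy_all_lt (x : String × Int) (l : List (String × Int))
    (h : ∀ z ∈ l, z.2 < x.2) : PySem.List.insertBy pvBf x l = x :: l := by
  cases l with
  | nil => rfl
  | cons y ys =>
    simp only [PySem.List.insertBy]
    rw [if_pos (by simpa [pvBf] using h y (by simp))]

lemma pvFilter_insertBy (q : String × Int → Bool) (x : String × Int) :
    ∀ l : List (String × Int), l.Pairwise (fun a b => b.2 ≤ a.2) →
    (PySem.List.insertBy pvBf x l).filter q =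
      if q x then PySem.List.insertBy pvBf x (l.filter q) else l.filter q := by
  intro l
  induction l with
  | nil =>
    intro _
    cases hq : q x <;> simp [PySem.List.insertBy, List.filter, hq]
  | cons y ys ih =>
    intro hp
    have hpy : ∀ z ∈ ys, z.2 ≤ y.2 := fun z hz => List.rel_of_pairwise_cons hp hz
    have hpt : List.Pairwise (fun a b => b.2 ≤ a.2) ys := hp.of_cons
    simp only [PySem.List.insertBy]
    by_cases hxy : pvBf x y = true
    · rw [if_pos hxy]
      have hylt : y.2 < x.2 := by simpa [pvBf] using hxy
      by_cases hqy : q y = true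
      · have hins : PySem.List.insertBy pvBf x (List.filter q (y :: ys)) = x :: List.filter q (y :: ys) := by
          rw [List.filter_cons_of_pos hqy]
          simp only [PySem.List.insertBy]
          rw [if_pos hxy]
        cases hqx : q x with
        | true =>
          simp [hqx, hqy]
          simp only [PySem.List.insertBy]
          rw [if_pos hxy]
        | false => simp [hqx, hqy]
      · have hall : ∀ z ∈ List.filter q ys, z.2 < x.2 := by
          intro z hz
          exact lt_of_le_of_lt (hpy _ (List.mem_filter.mp hz).1) hylt
        have hf : List.filter q (y :: ys) = List.filter q ys := List.filter_cons_of_neg (by simpa using hqy)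
        cases hqx : q x with
        | true => rw [hf, pvInsertBy_all_lt x _ hall]; simp [hqy, hqx]
        | false => simp [hqy, hqx]
    · rw [if_neg hxy]
      simp only [List.filter_cons]
      by_cases hqy : q y = true
      · simp only [hqy, if_pos]
        rw [ih hpt]
        by_cases hqx : q x = true
        · simp only [hqx, if_pos]
          simp only [PySem.List.insertBy]
          rw [if_neg hxy]
        · simp [hqx]
      · simp only [hqy]
        rw [ih hpt]
        simp

lemma pvSortedDesc_filter (q : String × Int → Bool) (xs : List (String × Int)) :
    pvSortedDesc (xs.filter q) = (pvSortedDesc xs).filter q := by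
  induction xs using List.reverseRecOn with
  | nil => rfl
  | append_singleton xs x ih =>
    rw [List.filter_append, pvSortedDesc_append_singleton,
      pvFilter_insertBy q x _ (pvSortedDesc_pairwise xs)]
    cases hq : q x with
    | true => simp only [List.filter_cons, hq, List.filter_nil, if_pos,
        pvSortedDesc_append_singleton, ih]
    | false => simp [hq, ih]

lemma pvFind_insertBy (rem : Int) (x : String × Int) :
    ∀ l : List (String × Int), l.Pairwise (fun a b => b.2 ≤ a.2) →
    (PySem.List.insertBy pvBf x l).find? (pvFit rem) =
      match l.find? (pvFit rem) with
      | some p => if pvFit rem x = true ∧ p.2 < x.2 then some x else some p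
      | none => if pvFit rem x then some x else none := by
  intro l
  induction l with
  | nil => intro _; cases hf : pvFit rem x <;> simp [PySem.List.insertBy, hf]
  | cons y ys ih =>
    intro hp
    have hpy : ∀ z ∈ ys, z.2 ≤ y.2 := fun z hz => List.rel_of_pairwise_cons hp hz
    have hpt : List.Pairwise (fun a b => b.2 ≤ a.2) ys := hp.of_cons
    simp only [PySem.List.insertBy]
    by_cases hxy : pvBf x y = true
    · rw [if_pos hxy]
      have hylt : y.2 < x.2 := by simpa [pvBf] using hxy
      cases hfx : pvFit rem x with
      | true =>
        have hfind : List.find? (pvFit rem) (x :: y :: ys) = some x := by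
          simp [hfx]
        rw [hfind]
        cases hfy : List.find? (pvFit rem) (y :: ys) with
        | none => simp
        | some p =>
          have hpmem := List.mem_of_find?_eq_some hfy
          have hple : p.2 ≤ y.2 := by
            rcases List.mem_cons.mp hpmem with h | hm
            · exact le_of_eq (congrArg Prod.snd h)
            · exact hpy _ hm
          have hlt : p.2 < x.2 := lt_of_le_of_lt hple hylt
          simp [hlt]
      | false =>
        have hfind : List.find? (pvFit rem) (x :: y :: ys) = List.find? (pvFit rem) (y :: ys) := by
          simp [List.find?_cons, hfx]
        rw [hfind]
        cases hfy : List.find? (pvFit rem) (y :: ys) with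
        | none => simp
        | some p => simp
    · rw [if_neg hxy]
      have hxle : x.2 ≤ y.2 := by
        simp only [pvBf, decide_eq_true_eq] at hxy
        omega
      cases hfy : pvFit rem y with
      | true =>
        have h1 : List.find? (pvFit rem) (y :: PySem.List.insertBy pvBf x ys) = some y := by
          simp [hfy]
        have h2 : List.find? (pvFit rem) (y :: ys) = some y := by
          simp [hfy]
        rw [h1, h2]
        have hnot : ¬ (pvFit rem x = true ∧ y.2 < x.2) := by
          rintro ⟨-, h⟩; omega
        simp [hnot]
      | false =>
        have h1 : List.find? (pvFit rem) (y :: PySem.List.insertBy pvBf x ys) =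
            List.find? (pvFit rem) (PySem.List.insertBy pvBf x ys) := by
          simp [hfy]
        have h2 : List.find? (pvFit rem) (y :: ys) = List.find? (pvFit rem) ys := by
          simp [hfy]
        rw [h1, h2, ih hpt]

lemma pvPick_eq_find (xs : List (String × Int)) (rem : Int) :
    pvPick xs rem = ((pvSortedDesc xs).find? (pvFit rem)).getD ("", 0) := by
  induction xs using List.reverseRecOn with
  | nil => rfl
  | append_singleton xs x ih =>
    rw [pvSortedDesc_append_singleton,
      pvFind_insertBy rem x _ (pvSortedDesc_pairwise xs)]
    unfold pvPick
    rw [List.foldl_append]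
    have ihx : xs.foldl
        (fun (bm : String × Int) (kv : String × Int) =>
          if kv.2 ≤ rem then (if kv.2 > bm.2 then (kv.1, kv.2) else bm) else bm)
        ("", 0) = ((pvSortedDesc xs).find? (pvFit rem)).getD ("", 0) := ih
    rw [ihx]
    cases hf : (pvSortedDesc xs).find? (pvFit rem) with
    | none =>
      simp only [Option.getD_none, List.foldl_cons, List.foldl_nil]
      by_cases h1 : x.2 ≤ rem
      · by_cases h2 : x.2 > 0
        · rw [if_pos h1, if_pos h2]
          have : pvFit rem x = true := by simp [pvFit]; omega
          simp [this]
        · rw [if_pos h1, if_neg h2]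
          have : pvFit rem x = false := by simp [pvFit]; omega
          simp [this]
      · rw [if_neg h1]
        have : pvFit rem x = false := by simp [pvFit]; omega
        simp [this]
    | some p =>
      have hfit : pvFit rem p = true := List.find?_some hf
      have hp : 0 < p.2 ∧ p.2 ≤ rem := by simpa [pvFit] using hfit
      simp only [Option.getD_some, List.foldl_cons, List.foldl_nil]
      by_cases h1 : x.2 ≤ rem
      · by_cases h2 : x.2 > p.2
        · rw [if_pos h1, if_pos h2]
          have hc : pvFit rem x = true ∧ p.2 < x.2 := by
            constructor
            · simp [pvFit]; omega
            · omega
          simp [hc]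
        · rw [if_pos h1, if_neg h2]
          have hc : ¬ (pvFit rem x = true ∧ p.2 < x.2) := by rintro ⟨-, h⟩; omega
          simp [hc]
      · rw [if_neg h1]
        have hc : ¬ (pvFit rem x = true ∧ p.2 < x.2) := by
          rintro ⟨h, -⟩
          simp [pvFit] at h; omega
        simp [hc]

lemma pvBestCow_eq_pick (d : PySem.Dict String Int) (rem : Int) (hnd : d.keys.Nodup) :
    bestCow d rem = (pvPick d.items rem).1 := by
  unfold bestCow pvPick
  rw [PySem.Dict.items_eq_map_keys d hnd 0, List.foldl_map]

lemma pvGetD_erase_of_ne (d : PySem.Dict String Int) (k k' : String) (h : k' ≠ k) :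
    (d.erase k).getD k' 0 = d.getD k' 0 := by
  simp only [PySem.Dict.getD, PySem.Dict.get?, PySem.Dict.erase]
  induction d.items with
  | nil => rfl
  | cons p t ih =>
    by_cases hpk : (p.1 == k) = true
    · have hk' : ((fun p : String × Int => p.1 == k') p) = false := by
        have := beq_iff_eq.mp hpk
        simp [this, Ne.symm h]
      rw [List.filter_cons_of_neg (by simp [hpk])]
      have hk'' : (p.1 == k') = false := hk'
      simp only [List.find?_cons, hk'']
      exact ih
    · rw [List.filter_cons_of_pos (by simp_all)]
      by_cases hk' : ((fun p : String × Int => p.1 == k') p) = true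
      · have hk'' : (p.1 == k') = true := hk'
        simp only [List.find?_cons, hk'']
      · have hk'' : (p.1 == k') = false := by simpa using hk'
        simp only [List.find?_cons, hk'']
        exact ih

lemma pvNodup_keys_erase (d : PySem.Dict String Int) (k : String) (h : d.keys.Nodup) :
    (d.erase k).keys.Nodup := by
  have hsub : (d.erase k).keys.Sublist d.keys := by
    simp only [PySem.Dict.keys, PySem.Dict.erase]
    exact List.Sublist.map _ (List.filter_sublist)
  exact h.sublist hsub

lemma pvLenFilterLt (l : List (String × Int)) (p : String × Int → Bool) (x : String × Int)
    (hx : x ∈ l) (hpx : p x = false) : (l.filter p).length < l.length := by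
  have h1 : (l.filter p).length ≤ l.length := List.length_filter_le _ _
  rcases Nat.eq_or_lt_of_le h1 with he | hl
  · exfalso
    have hself := List.filter_eq_self.mp ((List.Sublist.length_eq (List.filter_sublist)).mp he)
    have := hself x hx
    simp [hpx] at this
  · exact hl

lemma pvMain : ∀ (fuel : Nat) (d : PySem.Dict String Int) (limit weight : Int) (acc : List String),
    d.keys.Nodup → d.size < fuel →
    ¬ (0 < d.getD "" 0 ∧ d.getD "" 0 ≤ limit - weight) →
    tripGo d limit weight acc fuel = acc ++ pvG (pvSortedDesc d.items) (limit - weight) := by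
  intro fuel
  induction fuel with
  | zero => intro d _ _ _ _ hs _; omega
  | succ fuel ih =>
    intro d limit weight acc hnd hs hinv
    have hbc := pvBestCow_eq_pick d (limit - weight) hnd
    rw [pvPick_eq_find] at hbc
    simp only [tripGo]
    cases hf : (pvSortedDesc d.items).find? (pvFit (limit - weight)) with
    | none =>
      rw [hf] at hbc
      simp only [Option.getD_none] at hbc
      rw [hbc]
      have hlen : (PySem.Str.len "" == 0) = true := by decide
      rw [if_pos hlen]
      have hnofit : ∀ a ∈ pvSortedDesc d.items, pvFit (limit - weight) a = false := by
        intro a ha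
        simpa using List.find?_eq_none.mp hf a ha
      have : pvG (pvSortedDesc d.items) (limit - weight) = [] := by
        have := pvG_skip (pvSortedDesc d.items) [] (limit - weight) hnofit
        simpa using this
      rw [this, List.append_nil]
    | some kv =>
      rw [hf] at hbc
      simp only [Option.getD_some] at hbc
      have hfit : 0 < kv.2 ∧ kv.2 ≤ limit - weight := by
        simpa [pvFit] using List.find?_some hf
      have hmem : kv ∈ d.items := (PySem.List.mem_sorted _ _ _ _).mp (List.mem_of_find?_eq_some hf)
      have hget : d.get? kv.1 = some kv.2 := by
        exact (PySem.Dict.get?_eq_some_iff_mem_items d kv.1 kv.2 hnd).mpr (by simpa using hmem)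
      have hgetD : d.getD kv.1 0 = kv.2 := by simp [PySem.Dict.getD, hget]
      have hkne : kv.1 ≠ "" := by
        intro hk
        exact hinv ⟨by rw [hk] at hgetD; omega, by rw [hk] at hgetD; omega⟩
      rw [hbc, hgetD]
      rw [if_neg (show ¬ ((PySem.Str.len kv.1 == 0) = true) by
        simp only [PySem.Str.len, beq_iff_eq, Nat.cast_eq_zero, List.length_eq_zero_iff]
        intro hh
        exact hkne (String.toList_eq_nil_iff.mp hh))]
      -- decompose the sorted list around the found element
      rcases List.find?_eq_some_iff_append.mp hf with ⟨hfitb, as, bs, hsplit, hnofit⟩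
      -- keys of the sorted list are nodup
      have hperm : (pvSortedDesc d.items).Perm d.items := PySem.List.sorted_perm _ _ _
      have hndl : ((pvSortedDesc d.items).map Prod.fst).Nodup := by
        have hp2 : ((pvSortedDesc d.items).map Prod.fst).Perm (d.items.map Prod.fst) := hperm.map _
        exact (hp2.nodup_iff).mpr (by simpa [PySem.Dict.keys] using hnd)
      rw [hsplit] at hndl
      have hndl' : (List.map Prod.fst as ++ kv.1 :: List.map Prod.fst bs).Nodup := by
        simpa using hndl
      have hmid : (kv.1 :: (List.map Prod.fst as ++ List.map Prod.fst bs)).Nodup := List.nodup_middle.mp hndl'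
      have hnotin : kv.1 ∉ List.map Prod.fst as ++ List.map Prod.fst bs := (List.nodup_cons.mp hmid).1
      have hkeys : ∀ a ∈ as ++ bs, a.1 ≠ kv.1 := by
        intro a ha hak
        apply hnotin
        rw [← hak]
        rcases List.mem_append.mp ha with h1 | h2
        · exact List.mem_append.mpr (Or.inl (List.mem_map_of_mem h1))
        · exact List.mem_append.mpr (Or.inr (List.mem_map_of_mem h2))
      -- erased dict: items filtered
      have herase : (d.erase kv.1).items = d.items.filter (fun p => !(p.1 == kv.1)) := rfl
      have hefl : pvSortedDesc ((d.erase kv.1).items) = as ++ bs := by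
        rw [herase, pvSortedDesc_filter, hsplit]
        rw [List.filter_append, List.filter_cons]
        have h1 : as.filter (fun p => !(p.1 == kv.1)) = as :=
          List.filter_eq_self.mpr (fun a ha => by
            simp [hkeys a (List.mem_append.mpr (Or.inl ha))])
        have h2 : bs.filter (fun p => !(p.1 == kv.1)) = bs :=
          List.filter_eq_self.mpr (fun a ha => by
            simp [hkeys a (List.mem_append.mpr (Or.inr ha))])
        simp [h1, h2]
      -- apply IH
      have hsz : (d.erase kv.1).size < fuel := by
        have hlt : (d.erase kv.1).size < d.size := by
          simp only [PySem.Dict.size, herase]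
          exact pvLenFilterLt _ _ kv hmem (by simp)
        have : d.size ≤ fuel := Nat.lt_succ_iff.mp hs
        omega
      have hinv' : ¬ (0 < (d.erase kv.1).getD "" 0 ∧ (d.erase kv.1).getD "" 0 ≤ limit - (weight + kv.2)) := by
        rw [pvGetD_erase_of_ne d kv.1 "" (Ne.symm hkne)]
        rintro ⟨h1, h2⟩
        exact hinv ⟨h1, by omega⟩
      rw [ih (d.erase kv.1) limit (weight + kv.2) (acc ++ [kv.1])
        (pvNodup_keys_erase d kv.1 hnd) hsz hinv']
      rw [hefl]
      -- right-hand side: pvG over as ++ kv :: bs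
      have hnofit' : ∀ a ∈ as, pvFit (limit - weight) a = false := by
        intro a ha
        simpa using hnofit a ha
      rw [hsplit, pvG_skip as _ _ hnofit']
      have hgside : pvG (kv :: bs) (limit - weight) = kv.1 :: pvG bs (limit - weight - kv.2) := by
        simp only [pvG]
        rw [if_pos hfit]
      rw [hgside]
      have hg2 : pvG (as ++ bs) (limit - (weight + kv.2)) = pvG bs (limit - (weight + kv.2)) := by
        refine pvG_skip as bs _ ?_
        intro a ha
        exact pvFit_mono _ _ a (by omega) (hnofit' a ha)
      rw [hg2]
      have harith : limit - (weight + kv.2) = limit - weight - kv.2 := by omega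
      rw [harith]
      simp

-- ===== VERDICT (by name: the statement is the Claim_ definition above) =====
theorem trip_spec : Claim_unchanged_trip := by
  intro cows limit _ hnD
  unfold D_trip at hnD
  unfold trip trip_alt
  rw [pvMain ((PySem.Dict.ofList cows).size + 1) (PySem.Dict.ofList cows) limit 0 []
    (PySem.Dict.nodup_keys_ofList cows) (Nat.lt_succ_self _)
    (by
      intro hcon
      exact hnD ⟨hcon.1, by have := hcon.2; omega⟩)]
  rw [pvFoldB]
  simp only [List.nil_append, sub_zero]
  rfl

theorem trip_changed : Claim_changed_trip := by unfold Claim_changed_trip; decide
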